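-- pv_equiv track=rewrite | github.com/punchyouinthenuts/GOJI | scripts/Standalone & Test Scripts/City of Plugerville List Processing.py | build_pairwise
-- ===== SOURCE A (Python) =====
-- from typing import Optional, List, Tuple, Dict
--
-- def build_pairwise(firsts: List[str], lasts: List[str]) -> Optional[str]:
--     if not firsts or not lasts:
--         return None
--     if len(firsts) == len(lasts):
--         return " & ".join(f"{f} {l}" for f, l in zip(firsts, lasts))
--     if len(firsts) == 1:
--         f = firsts[0]
--         return " & ".join(f"{f} {l}" for l in lasts)
--     if len(lasts) == 1:
--         l = lasts[0]
--         return " & ".join(f"{f} {l}" for f in firsts)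
--     m = min(len(firsts), len(lasts))
--     paired = [f"{firsts[i]} {lasts[i]}" for i in range(m)]
--     if len(firsts) > m:
--         paired += [f"{f} {lasts[-1]}" for f in firsts[m:]]
--     else:
--         paired += [f"{firsts[-1]} {l}" for l in lasts[m:]]
--     return " & ".join(paired)
-- ===== SOURCE B (Python) =====
-- from typing import Optional, List
--
-- def build_pairwise(firsts: List[str], lasts: List[str]) -> Optional[str]:
--     if not firsts or not lasts:
--         return None
--     fs = firsts[::-1]
--     ls = lasts[::-1]
--     parts = []
--     while True:
--         f = fs.pop()
--         l = ls.pop()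
--         parts.append(f + " " + l)
--         if not fs and not ls:
--             break
--         if not fs:
--             fs = [f]
--         if not ls:
--             ls = [l]
--     return " & ".join(parts)
-- ===== Notes on version B (the rewrite author's own statement) =====
-- stated objective: alternative
-- what changed: Replaces A's four-branch length case analysis (zip, singleton broadcasts, min-pairing plus padded tail lists) by a single worklist loop that pops one name from each side per step, re-seeds a singleton of the just-popped name when one side empties, and joins the accumulated pairs once at the end; no lengths, indices or branch-per-shape.
import Mathlib
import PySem

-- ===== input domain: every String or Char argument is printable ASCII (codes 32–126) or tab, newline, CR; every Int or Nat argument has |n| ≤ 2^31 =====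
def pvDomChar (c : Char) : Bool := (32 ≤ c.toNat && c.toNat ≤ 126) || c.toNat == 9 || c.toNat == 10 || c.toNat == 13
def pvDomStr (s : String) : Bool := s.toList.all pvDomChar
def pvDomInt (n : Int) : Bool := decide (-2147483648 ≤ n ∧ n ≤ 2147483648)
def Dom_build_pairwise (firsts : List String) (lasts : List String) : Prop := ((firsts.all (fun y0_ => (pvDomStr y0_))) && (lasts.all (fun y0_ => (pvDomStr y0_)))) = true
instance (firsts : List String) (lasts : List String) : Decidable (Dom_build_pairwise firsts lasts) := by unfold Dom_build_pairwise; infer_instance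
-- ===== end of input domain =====

-- B replaces A's four-branch, length-driven case analysis by one worklist loop popping a name
-- from each side per step (re-seeding a singleton when one side empties); objective: alternative.

-- ===== PORT A =====
def build_pairwise (firsts : List String) (lasts : List String) : Option String :=
  if firsts = [] ∨ lasts = [] then none
  else if firsts.length = lasts.length then
    some (PySem.Str.join " & " ((firsts.zip lasts).map (fun p => p.1 ++ " " ++ p.2)))
  else if firsts.length = 1 then
    let f := firsts.getD 0 ""
    some (PySem.Str.join " & " (lasts.map (fun l => f ++ " " ++ l)))
  else if lasts.length = 1 then
    let l := lasts.getD 0 ""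
    some (PySem.Str.join " & " (firsts.map (fun f => f ++ " " ++ l)))
  else
    let m := min firsts.length lasts.length
    let paired := (List.range m).map (fun i => firsts.getD i "" ++ " " ++ lasts.getD i "")
    let paired' := if m < firsts.length
      then paired ++ (firsts.drop m).map (fun f => f ++ " " ++ lasts.getD (lasts.length - 1) "")
      else paired ++ (lasts.drop m).map (fun l => firsts.getD (firsts.length - 1) "" ++ " " ++ l)
    some (PySem.Str.join " & " paired')

-- ===== PORT B =====
-- Source B's loop: pop one name from the end of each reversed copy per step (= take the head of
-- the remaining forward list, which is what .pop() on the reversed copy returns), re-seed a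
-- singleton when one side empties, accumulate the pair strings.
def pvLoop (fs ls parts : List String) : List String :=
  match fs, ls with
  | f :: ft, l :: lt =>
      let parts' := parts ++ [f ++ " " ++ l]
      if ft = [] ∧ lt = [] then parts'
      else pvLoop (if ft = [] then [f] else ft) (if lt = [] then [l] else lt) parts'
  | _, _ => parts   -- unreachable: the loop runs with both lists nonempty
  termination_by fs.length + ls.length
  decreasing_by
    rename_i h
    rcases Decidable.em (ft = []) with h1 | h1 <;> rcases Decidable.em (lt = []) with h2 | h2
    · exact absurd ⟨h1, h2⟩ h
    · have := List.length_pos_of_ne_nil h2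
      simp only [dif_neg h2, h1, dite_true, List.length_cons, List.length_nil]
      omega
    · have := List.length_pos_of_ne_nil h1
      simp only [dif_neg h1, h2, dite_true, List.length_cons, List.length_nil]
      omega
    · have := List.length_pos_of_ne_nil h1
      have := List.length_pos_of_ne_nil h2
      simp only [dif_neg h1, dif_neg h2, List.length_cons]
      omega

def build_pairwise_alt (firsts : List String) (lasts : List String) : Option String :=
  if firsts = [] ∨ lasts = [] then none
  else some (PySem.Str.join " & " (pvLoop firsts lasts []))

-- ===== PRECONDITION & SPEC =====
def Spec_build_pairwise (firsts : List String) (lasts : List String) (out : Option String) : Prop := out = build_pairwise_alt firsts lasts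
instance (firsts : List String) (lasts : List String) (out : Option String) : Decidable (Spec_build_pairwise firsts lasts out) := by unfold Spec_build_pairwise; infer_instance

-- ===== CLAIM (what is proved, stated in full; the proofs are below) =====
def Claim_equal_build_pairwise : Prop := ∀ (firsts : List String) (lasts : List String), Dom_build_pairwise firsts lasts → Spec_build_pairwise firsts lasts (build_pairwise firsts lasts)

-- ===== LEMMAS AND PROOFS =====

-- Common characterisation both sides are reduced to: the clamped-index join.
def pvClampList (fs ls : List String) : List String :=
  (List.range (max fs.length ls.length)).map (fun i =>
    fs.getD (min i (fs.length - 1)) "" ++ " " ++ ls.getD (min i (ls.length - 1)) "")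

def pvClamp (fs ls : List String) : String :=
  PySem.Str.join " & " (pvClampList fs ls)

theorem pvClampList_step (f l : String) (ft lt : List String) (h : ft ≠ [] ∨ lt ≠ []) :
    pvClampList (f :: ft) (l :: lt) =
      (f ++ " " ++ l) ::
        pvClampList (if ft = [] then [f] else ft) (if lt = [] then [l] else lt) := by
  have hftlen : (if ft = [] then [f] else ft).length = max ft.length 1 := by
    split
    · simp_all
    · rename_i hne; have := List.length_pos_of_ne_nil hne; omega
  have hltlen : (if lt = [] then [l] else lt).length = max lt.length 1 := by
    split
    · simp_all
    · rename_i hne; have := List.length_pos_of_ne_nil hne; omega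
  have hM : max (f :: ft).length (l :: lt).length =
      max (if ft = [] then [f] else ft).length (if lt = [] then [l] else lt).length + 1 := by
    simp only [List.length_cons, hftlen, hltlen]
    rcases h with h1 | h1 <;> (have := List.length_pos_of_ne_nil h1; omega)
  apply List.ext_getElem
  · simp only [pvClampList, List.length_map, List.length_range, List.length_cons, hftlen,
      hltlen]
    rcases h with h1 | h1 <;> (have := List.length_pos_of_ne_nil h1; omega)
  · intro i h1 h2
    simp only [pvClampList, List.length_map, List.length_range, hM] at h1
    cases i with
    | zero => simp [pvClampList, List.range_succ_eq_map]
    | succ i =>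
        have hi : i < max (if ft = [] then [f] else ft).length
            (if lt = [] then [l] else lt).length := by omega
        simp only [pvClampList, hM, List.range_succ_eq_map, List.map_cons, List.map_map,
          List.getElem_cons_succ, List.getElem_map, List.getElem_range, Function.comp_apply]
        congr 1
        · congr 1
          by_cases hft : ft = []
          · subst hft; simp
          · have hl1 : 0 < ft.length := List.length_pos_of_ne_nil hft
            simp only [if_neg hft, List.length_cons, Nat.succ_eq_add_one]
            by_cases hcase : i < ft.length - 1
            · rw [show min (i + 1) (ft.length + 1 - 1) = i + 1 from by omega,
                  show min i (ft.length - 1) = i from by omega]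
              simp
            · rw [show min (i + 1) (ft.length + 1 - 1) = ft.length from by omega,
                  show min i (ft.length - 1) = ft.length - 1 from by omega,
                  show ft.length = (ft.length - 1) + 1 from by omega]
              simp
        · by_cases hlt : lt = []
          · subst hlt; simp
          · have hl1 : 0 < lt.length := List.length_pos_of_ne_nil hlt
            simp only [if_neg hlt, List.length_cons, Nat.succ_eq_add_one]
            by_cases hcase : i < lt.length - 1
            · rw [show min (i + 1) (lt.length + 1 - 1) = i + 1 from by omega,
                  show min i (lt.length - 1) = i from by omega]
              simp
            · rw [show min (i + 1) (lt.length + 1 - 1) = lt.length from by omega,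
                  show min i (lt.length - 1) = lt.length - 1 from by omega,
                  show lt.length = (lt.length - 1) + 1 from by omega]
              simp

theorem pvLoop_eq_clampList (fs ls : List String) (parts : List String) (hf : fs ≠ [])
    (hl : ls ≠ []) : pvLoop fs ls parts = parts ++ pvClampList fs ls := by
  fun_induction pvLoop fs ls parts with
  | case1 parts f ft l lt parts' hboth =>
      obtain ⟨h1, h2⟩ := hboth
      subst h1; subst h2
      simp [parts', pvClampList]
  | case2 parts f ft l lt parts' hne ih =>
      have h : ft ≠ [] ∨ lt ≠ [] := by tauto
      simp only [dite_eq_ite] at ih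
      rw [pvClampList_step f l ft lt h,
          ih (by split <;> simp_all) (by split <;> simp_all)]
      simp [parts']
  | case3 x y parts h1 =>
      cases x with
      | nil => exact absurd rfl hf
      | cons a as =>
          cases y with
          | nil => exact absurd rfl hl
          | cons b bs => exact absurd rfl (h1 a as b bs rfl)

theorem pvA_eq_clamp (firsts lasts : List String) (hf : firsts ≠ []) (hl : lasts ≠ []) :
    build_pairwise firsts lasts = some (pvClamp firsts lasts) := by
  have hf1 : 0 < firsts.length := List.length_pos_of_ne_nil hf
  have hl1 : 0 < lasts.length := List.length_pos_of_ne_nil hl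
  rw [build_pairwise]
  simp only [if_neg (by tauto : ¬ (firsts = [] ∨ lasts = []))]
  unfold pvClamp pvClampList
  by_cases heq : firsts.length = lasts.length
  · rw [if_pos heq]
    congr 2
    apply List.ext_getElem
    · simp [heq]
    · intro i h1 h2
      simp only [List.length_map, List.length_zip, List.length_range] at h1 h2
      simp only [List.getElem_map, List.getElem_zip, List.getElem_range]
      rw [show min i (firsts.length - 1) = i from by omega,
          show min i (lasts.length - 1) = i from by omega,
          List.getD_eq_getElem _ _ (by omega), List.getD_eq_getElem _ _ (by omega)]
  · rw [if_neg heq]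
    by_cases hF1 : firsts.length = 1
    · rw [if_pos hF1]
      congr 2
      apply List.ext_getElem
      · simp; omega
      · intro i h1 h2
        simp only [List.length_map, List.length_range] at h1 h2
        simp only [List.getElem_map, List.getElem_range]
        rw [show min i (firsts.length - 1) = 0 from by omega,
            show min i (lasts.length - 1) = i from by omega,
            show lasts.getD i "" = lasts[i]'(by omega) from List.getD_eq_getElem _ _ (by omega)]
    · rw [if_neg hF1]
      by_cases hL1 : lasts.length = 1
      · rw [if_pos hL1]
        congr 2
        apply List.ext_getElem
        · simp; omega
        · intro i h1 h2
          simp only [List.length_map, List.length_range] at h1 h2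
          simp only [List.getElem_map, List.getElem_range]
          rw [show min i (lasts.length - 1) = 0 from by omega,
              show min i (firsts.length - 1) = i from by omega,
              show firsts.getD i "" = firsts[i]'(by omega) from List.getD_eq_getElem _ _ (by omega)]
      · rw [if_neg hL1]
        by_cases hm : min firsts.length lasts.length < firsts.length
        · rw [if_pos hm]
          congr 2
          apply List.ext_getElem
          · simp; omega
          · intro i h1 h2
            simp only [List.length_map, List.length_range, List.length_append,
              List.length_drop] at h1 h2
            have hfl : lasts.length < firsts.length := by omega
            have hiF : i < firsts.length := by omega
            by_cases hi : i < min firsts.length lasts.length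
            · rw [List.getElem_append_left
                    (by simp only [List.length_map, List.length_range]; omega)]
              simp only [List.getElem_map, List.getElem_range]
              rw [show min i (firsts.length - 1) = i from by omega,
                  show min i (lasts.length - 1) = i from by omega]
            · rw [List.getElem_append_right
                    (by simp only [List.length_map, List.length_range]; omega)]
              simp only [List.getElem_map, List.getElem_drop, List.length_map,
                List.length_range, List.getElem_range]
              rw [show min i (firsts.length - 1) = i from by omega,
                  show min i (lasts.length - 1) = lasts.length - 1 from by omega,
                  show firsts.getD i "" = firsts[i]'hiF from List.getD_eq_getElem _ _ hiF]
              simp only [show min firsts.length lasts.length +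
                (i - min firsts.length lasts.length) = i from by omega]
        · rw [if_neg hm]
          congr 2
          apply List.ext_getElem
          · simp; omega
          · intro i h1 h2
            simp only [List.length_map, List.length_range, List.length_append,
              List.length_drop] at h1 h2
            have hlf : firsts.length < lasts.length := by omega
            have hiL : i < lasts.length := by omega
            by_cases hi : i < min firsts.length lasts.length
            · rw [List.getElem_append_left
                    (by simp only [List.length_map, List.length_range]; omega)]
              simp only [List.getElem_map, List.getElem_range]
              rw [show min i (firsts.length - 1) = i from by omega,
                  show min i (lasts.length - 1) = i from by omega]
            · rw [List.getElem_append_right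
                    (by simp only [List.length_map, List.length_range]; omega)]
              simp only [List.getElem_map, List.getElem_drop, List.length_map,
                List.length_range, List.getElem_range]
              rw [show min i (firsts.length - 1) = firsts.length - 1 from by omega,
                  show min i (lasts.length - 1) = i from by omega,
                  show lasts.getD i "" = lasts[i]'hiL from List.getD_eq_getElem _ _ hiL]
              simp only [show min firsts.length lasts.length +
                (i - min firsts.length lasts.length) = i from by omega]

-- ===== VERDICT (by name: the statement is the Claim_ definition above) =====
theorem build_pairwise_spec : Claim_equal_build_pairwise := by
  intro firsts lasts _
  unfold Spec_build_pairwise build_pairwise_alt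
  by_cases h0 : firsts = [] ∨ lasts = []
  · simp [build_pairwise, h0]
  · have hf : firsts ≠ [] := by tauto
    have hl : lasts ≠ [] := by tauto
    rw [if_neg h0, pvA_eq_clamp firsts lasts hf hl,
        pvLoop_eq_clampList firsts lasts [] hf hl, List.nil_append, pvClamp]
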